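-- pv_equiv track=rewrite | github.com/mdsingh007/kushu | Edabit/snake_area.py | snake_area
-- ===== SOURCE A (Python) =====
-- def snake_area(grid):
--     grid = grid*grid
--     snake = 1
--     time = 0
--     while True:
--         if snake >= grid:
--             break
--         snake = snake*2
--         time += 1
--     return time-1
-- ===== SOURCE B (Python) =====
-- def snake_area(grid):
--     G = grid * grid
--     if G <= 1:
--         return -1
--     return (G - 1).bit_length() - 1
-- ===== Notes on version B (the rewrite author's own statement) =====
-- stated objective: simpler
-- what changed: Replaces the doubling while-loop and its two accumulators with a single closed-form bit_length expression over the squared grid.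
import Mathlib
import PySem

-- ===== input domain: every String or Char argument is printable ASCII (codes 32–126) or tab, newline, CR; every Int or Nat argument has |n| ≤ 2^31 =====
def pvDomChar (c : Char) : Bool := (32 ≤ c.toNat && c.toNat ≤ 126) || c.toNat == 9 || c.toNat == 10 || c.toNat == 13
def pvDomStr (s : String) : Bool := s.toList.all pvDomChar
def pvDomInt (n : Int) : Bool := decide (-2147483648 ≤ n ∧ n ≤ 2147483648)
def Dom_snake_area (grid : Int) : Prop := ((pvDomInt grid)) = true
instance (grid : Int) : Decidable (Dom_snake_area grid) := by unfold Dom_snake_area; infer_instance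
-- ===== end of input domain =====

-- B replaces A's doubling while-loop by the closed form (grid*grid - 1).bit_length() - 1 (simpler, no loop).

-- ===== PORT A =====
-- the 'while True' loop of A: doubles snake, counts time, stops as soon as snake >= G;
-- terminates because G - snake strictly decreases while 1 ≤ snake < G
def snakeLoop (G s t : Int) (h : 1 ≤ s) : Int :=
  if s ≥ G then t
  else snakeLoop G (s * 2) (t + 1) (by omega)
termination_by (G - s).toNat
decreasing_by omega

def snake_area (grid : Int) : Int :=
  snakeLoop (grid * grid) 1 0 (by norm_num) - 1

-- ===== PORT B =====
-- Python's int.bit_length on a nonnegative integer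
def bitLength (n : Nat) : Nat := if n = 0 then 0 else Nat.log2 n + 1

def snake_area_alt (grid : Int) : Int :=
  let G := grid * grid
  if G ≤ 1 then -1 else (bitLength (G - 1).toNat : Int) - 1

-- ===== PRECONDITION & SPEC =====
def Spec_snake_area (grid : Int) (out : Int) : Prop := out = snake_area_alt grid
instance (grid : Int) (out : Int) : Decidable (Spec_snake_area grid out) := by unfold Spec_snake_area; infer_instance

-- ===== CLAIM (what is proved, stated in full; the proofs are below) =====
def Claim_equal_snake_area : Prop := ∀ (grid : Int), Dom_snake_area grid → Spec_snake_area grid (snake_area grid)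

-- ===== LEMMAS AND PROOFS =====

-- the loop, started at snake = 2^j and time = j, returns log2(G-1) + 1 (for G ≥ 2)
lemma snakeLoop_char (G : Int) (hG : 2 ≤ G) :
    ∀ d j, j + d = Nat.log2 (G - 1).toNat + 1 →
      snakeLoop G ((2 : Int) ^ j) j (one_le_pow₀ (by norm_num)) =
        ((Nat.log2 (G - 1).toNat : Int) + 1) := by
  intro d
  induction d with
  | zero =>
    intro j hj
    have hlt : ((G - 1).toNat) < 2 ^ (Nat.log2 (G - 1).toNat + 1) := by
      have := Nat.lt_pow_succ_log_self (b := 2) (by norm_num) (G - 1).toNat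
      simpa [Nat.log2_eq_log_two] using this
    have hjj : j = Nat.log2 (G - 1).toNat + 1 := by omega
    subst hjj
    have hge : (2 : Int) ^ (Nat.log2 (G - 1).toNat + 1) ≥ G := by
      have hc : ((G - 1).toNat : Int) = G - 1 := by omega
      have h2 : ((2 : Int) ^ (Nat.log2 (G - 1).toNat + 1)) =
          ((2 ^ (Nat.log2 (G - 1).toNat + 1) : Nat) : Int) := by push_cast; ring
      have hlt' : ((G - 1).toNat : Int) < ((2 ^ (Nat.log2 (G - 1).toNat + 1) : Nat) : Int) := by
        exact_mod_cast hlt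
      rw [h2]; omega
    rw [snakeLoop, if_pos hge]; push_cast; ring
  | succ d ih =>
    intro j hj
    have hj' : j ≤ Nat.log2 (G - 1).toNat := by omega
    have hle : 2 ^ j ≤ (G - 1).toNat := by
      have h1 : (1 : Nat) < 2 := by norm_num
      have hne : (G - 1).toNat ≠ 0 := by omega
      have := (Nat.le_log_iff_pow_le h1 hne).1 (by simpa [Nat.log2_eq_log_two] using hj')
      exact this
    have hlt : ¬ ((2 : Int) ^ j ≥ G) := by
      have hcast : ((G - 1).toNat : Int) = G - 1 := by omega
      have h2 : ((2 : Int) ^ j) = ((2 ^ j : Nat) : Int) := by push_cast; ring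
      rw [h2]; omega
    rw [snakeLoop, if_neg hlt]
    have := ih (j + 1) (by omega)
    -- rewrite the recursive call into the 2^(j+1) form (proof argument is proof-irrelevant)
    have hcall : snakeLoop G ((2 : Int) ^ j * 2) (↑j + 1)
          (by have := one_le_pow₀ (M₀ := Int) (n := j) (a := 2) (by norm_num); omega) =
        snakeLoop G ((2 : Int) ^ (j + 1)) (↑(j + 1)) (one_le_pow₀ (by norm_num)) := by
      congr 1
    rw [hcall]
    exact this

lemma snake_main (G : Int) (_hG0 : 0 ≤ G) (h1 : 1 ≤ (1:Int)) :
    snakeLoop G 1 0 h1 - 1 = if G ≤ 1 then -1 else (bitLength (G - 1).toNat : Int) - 1 := by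
  by_cases hG : G ≤ 1
  · rw [snakeLoop, if_pos (by omega)]
    simp [hG]
  · have hG2 : 2 ≤ G := by omega
    have hne : (G - 1).toNat ≠ 0 := by omega
    have h := snakeLoop_char G hG2 (Nat.log2 (G - 1).toNat + 1) 0 (by omega)
    simp only [pow_zero, Nat.cast_zero] at h
    rw [h]
    have hne' : G.toNat - 1 ≠ 0 := by omega
    have ht : (G - 1).toNat = G.toNat - 1 := by omega
    simp [bitLength, hG, hne', ht]

theorem snake_area_spec : Claim_equal_snake_area := by
  intro grid _
  unfold Spec_snake_area snake_area snake_area_alt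
  exact snake_main (grid * grid) (mul_self_nonneg grid) _
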